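-- pv_equiv track=rewrite | github.com/Arqera-IO/arqera-math | src/arqera_math/preconditions.py | _classify_profession
-- ===== SOURCE A (Python) =====
-- def _classify_profession(profession: str) -> str:
--     """Classify a profession string into a category."""
--     prof_lower = profession.lower()
--     if any(kw in prof_lower for kw in ("founder", "ceo", "cto", "entrepreneur", "co-founder")):
--         return "founder"
--     if any(kw in prof_lower for kw in ("engineer", "developer", "programmer", "architect")):
--         return "engineer"
--     if any(kw in prof_lower for kw in ("designer", "artist", "writer", "creative", "musician")):
--         return "creative"
--     return "default"
-- ===== SOURCE B (Python) =====
-- KW_GROUPS = (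
--     ("founder", "ceo", "cto", "entrepreneur", "co-founder"),
--     ("engineer", "developer", "programmer", "architect"),
--     ("designer", "artist", "writer", "creative", "musician"),
-- )
-- NAMES = ("founder", "engineer", "creative", "default")
--
--
-- def _rank_at(s, i):
--     """Rank of the best (lowest-index) keyword group with a keyword starting at position i, 3 if none."""
--     for rank, kws in enumerate(KW_GROUPS):
--         if any(s.startswith(kw, i) for kw in kws):
--             return rank
--     return 3
--
--
-- def _classify_profession(profession: str) -> str:
--     """Classify a profession string into a category.
--
--     Single left-to-right scan over positions of the lowercased string,
--     maintaining the minimum category rank seen at any position.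
--     """
--     s = profession.lower()
--     best = 3
--     for i in range(len(s)):
--         best = min(best, _rank_at(s, i))
--     return NAMES[best]
-- ===== Notes on version B (the rewrite author's own statement) =====
-- stated objective: alternative
-- what changed: Replaces A's three keyword-driven whole-string substring searches with a single scan over positions of the lowercased string that classifies the keyword prefix at each position and min-accumulates the best category rank.
import Mathlib
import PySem

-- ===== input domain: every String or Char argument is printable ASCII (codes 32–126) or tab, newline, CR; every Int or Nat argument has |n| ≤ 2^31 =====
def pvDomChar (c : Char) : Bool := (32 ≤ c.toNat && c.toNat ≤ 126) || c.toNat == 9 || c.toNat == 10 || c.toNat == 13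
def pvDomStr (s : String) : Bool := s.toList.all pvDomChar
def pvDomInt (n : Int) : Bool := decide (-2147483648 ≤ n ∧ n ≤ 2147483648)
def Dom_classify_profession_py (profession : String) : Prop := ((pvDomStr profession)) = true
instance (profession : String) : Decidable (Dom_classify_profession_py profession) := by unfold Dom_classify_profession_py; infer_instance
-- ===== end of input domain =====

-- B replaces A's three keyword-driven substring searches with one position scan of the
-- lowercased string that classifies the prefix at each position and min-accumulates the
-- best category rank; same return value (objective: alternative).
-- ===== PORT A =====
def classify_profession_py (profession : String) : String :=
  let prof_lower := PySem.Str.lower profession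
  if ["founder", "ceo", "cto", "entrepreneur", "co-founder"].any (fun kw => PySem.Str.isIn kw prof_lower) then
    "founder"
  else if ["engineer", "developer", "programmer", "architect"].any (fun kw => PySem.Str.isIn kw prof_lower) then
    "engineer"
  else if ["designer", "artist", "writer", "creative", "musician"].any (fun kw => PySem.Str.isIn kw prof_lower) then
    "creative"
  else
    "default"

-- ===== PORT B =====
def pvKwGroups : List (List String) :=
  [["founder", "ceo", "cto", "entrepreneur", "co-founder"],
   ["engineer", "developer", "programmer", "architect"],
   ["designer", "artist", "writer", "creative", "musician"]]

def pvNames : List String := ["founder", "engineer", "creative", "default"]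

-- _rank_at: first group (by index = rank) with a keyword starting at position i, else 3.
-- Python's s.startswith(kw, i) with 0 ≤ i ≤ len(s) is exactly 'kw is a prefix of s[i:]'.
def pvRankAt (s : List Char) (i : Nat) : Nat :=
  (pvKwGroups.findIdx? (fun kws => kws.any (fun kw => PySem.Chars.startswith (s.drop i) kw.toList))).getD 3

def classify_profession_py_alt (profession : String) : String :=
  let s := (PySem.Str.lower profession).toList
  let best := (List.range s.length).foldl (fun b i => min b (pvRankAt s i)) 3
  -- NAMES[best]: best is always ≤ 3, so the plain index is in range; getD is exact here.
  pvNames.getD best "default"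

-- ===== PRECONDITION & SPEC =====
def Spec_classify_profession_py (profession : String) (out : String) : Prop := out = classify_profession_py_alt profession
instance (profession : String) (out : String) : Decidable (Spec_classify_profession_py profession out) := by unfold Spec_classify_profession_py; infer_instance

-- ===== CLAIM (what is proved, stated in full; the proofs are below) =====
def Claim_equal_classify_profession_py : Prop := ∀ (profession : String), Dom_classify_profession_py profession → Spec_classify_profession_py profession (classify_profession_py profession)

-- ===== LEMMAS AND PROOFS =====

-- pvRankAt as an if-chain over the three per-position group tests.
lemma pvRankAt_eq (s : List Char) (i : Nat) :
    pvRankAt s i =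
      (if (["founder", "ceo", "cto", "entrepreneur", "co-founder"] : List String).any (fun kw => PySem.Chars.startswith (s.drop i) kw.toList) then 0
       else if (["engineer", "developer", "programmer", "architect"] : List String).any (fun kw => PySem.Chars.startswith (s.drop i) kw.toList) then 1
       else if (["designer", "artist", "writer", "creative", "musician"] : List String).any (fun kw => PySem.Chars.startswith (s.drop i) kw.toList) then 2
       else 3) := by
  cases h0 : (["founder", "ceo", "cto", "entrepreneur", "co-founder"] : List String).any (fun kw => PySem.Chars.startswith (s.drop i) kw.toList) <;>
  cases h1 : (["engineer", "developer", "programmer", "architect"] : List String).any (fun kw => PySem.Chars.startswith (s.drop i) kw.toList) <;>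
  cases h2 : (["designer", "artist", "writer", "creative", "musician"] : List String).any (fun kw => PySem.Chars.startswith (s.drop i) kw.toList) <;>
  simp [pvRankAt, pvKwGroups, List.findIdx?, List.findIdx?.go, h0, h1, h2]

lemma foldl_min_le_iff (g : Nat → Nat) (l : List Nat) (b r : Nat) :
    (l.foldl (fun b i => min b (g i)) b) ≤ r ↔ b ≤ r ∨ ∃ i ∈ l, g i ≤ r := by
  induction l generalizing b with
  | nil => simp
  | cons x xs ih =>
    simp only [List.foldl_cons, ih, List.mem_cons]
    constructor
    · rintro (h | ⟨i, hi, hg⟩)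
      · by_cases hb : b ≤ r
        · exact Or.inl hb
        · exact Or.inr ⟨x, Or.inl rfl, by omega⟩
      · exact Or.inr ⟨i, Or.inr hi, hg⟩
    · rintro (h | ⟨i, (rfl | hi), hg⟩)
      · exact Or.inl (le_trans (Nat.min_le_left _ _) h)
      · exact Or.inl (le_trans (Nat.min_le_right _ _) hg)
      · exact Or.inr ⟨i, hi, hg⟩

lemma foldl_min_ge (g : Nat → Nat) (l : List Nat) (b r : Nat)
    (hb : r ≤ b) (hg : ∀ i ∈ l, r ≤ g i) :
    r ≤ l.foldl (fun b i => min b (g i)) b := by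
  induction l generalizing b with
  | nil => simpa
  | cons x xs ih =>
    simp only [List.foldl_cons]
    exact ih _ (le_min hb (hg x (List.mem_cons_self))) (fun i hi => hg i (List.mem_cons_of_mem _ hi))

-- 'kw in t' for a nonempty kw ↔ kw starts at some position i < len(t).
lemma isIn_iff_exists_pos (kw t : List Char) (h : kw ≠ []) :
    PySem.Chars.isIn kw t = true ↔ ∃ i < t.length, kw <+: t.drop i := by
  rw [← PySem.Chars.exists_prefix_drop_iff_isIn]
  constructor
  · rintro ⟨j, hj⟩
    by_cases hlt : j < t.length
    · exact ⟨j, hlt, hj⟩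
    · exfalso
      have : t.drop j = [] := List.drop_eq_nil_of_le (by omega)
      rw [this] at hj
      exact h (List.prefix_nil.mp hj)
  · rintro ⟨i, _, hi⟩; exact ⟨i, hi⟩

-- a whole group matched somewhere ↔ matched at some position
lemma group_any_iff (kws : List String) (h : ∀ kw ∈ kws, kw.toList ≠ []) (t : List Char) :
    (kws.any (fun kw => PySem.Chars.isIn kw.toList t) = true) ↔
      ∃ i < t.length, kws.any (fun kw => PySem.Chars.startswith (t.drop i) kw.toList) = true := by
  simp only [List.any_eq_true, PySem.Chars.startswith_iff]
  constructor
  · rintro ⟨kw, hkw, hin⟩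
    obtain ⟨i, hi, hp⟩ := (isIn_iff_exists_pos _ _ (h kw hkw)).mp hin
    exact ⟨i, hi, kw, hkw, hp⟩
  · rintro ⟨i, hi, kw, hkw, hp⟩
    exact ⟨kw, hkw, (isIn_iff_exists_pos _ _ (h kw hkw)).mpr ⟨i, hi, hp⟩⟩

-- ===== VERDICT (by name: the statement is the Claim_ definition above) =====
theorem classify_profession_py_spec : Claim_equal_classify_profession_py := by
  intro profession _
  unfold Spec_classify_profession_py classify_profession_py classify_profession_py_alt
  set t : List Char := (PySem.Str.lower profession).toList with ht
  have hiso : ∀ kw : String, PySem.Str.isIn kw (PySem.Str.lower profession) = PySem.Chars.isIn kw.toList t := by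
    intro kw; simp [PySem.Str.isIn, ht]
  simp only [hiso]
  have hA0 := group_any_iff ["founder", "ceo", "cto", "entrepreneur", "co-founder"] (by decide) t
  have hA1 := group_any_iff ["engineer", "developer", "programmer", "architect"] (by decide) t
  have hA2 := group_any_iff ["designer", "artist", "writer", "creative", "musician"] (by decide) t
  set best := (List.range t.length).foldl (fun b i => min b (pvRankAt t i)) 3 with hbest
  have hle3 : best ≤ 3 := by
    rw [hbest, foldl_min_le_iff]; exact Or.inl le_rfl
  cases h0 : (["founder", "ceo", "cto", "entrepreneur", "co-founder"] : List String).any (fun kw => PySem.Chars.isIn kw.toList t) <;>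
  cases h1 : (["engineer", "developer", "programmer", "architect"] : List String).any (fun kw => PySem.Chars.isIn kw.toList t) <;>
  cases h2 : (["designer", "artist", "writer", "creative", "musician"] : List String).any (fun kw => PySem.Chars.isIn kw.toList t) <;>
  simp only [Bool.false_eq_true, if_true, if_false] <;>
  · -- compute best in each of the 8 cases
    first
    | ( -- group 0 matched: best = 0
        rw [h0] at hA0
        obtain ⟨i, hi, hc⟩ := hA0.mp rfl
        have hub : best ≤ 0 := by
          rw [hbest, foldl_min_le_iff]
          exact Or.inr ⟨i, List.mem_range.mpr hi, by rw [pvRankAt_eq, hc]; simp⟩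
        have : best = 0 := Nat.le_zero.mp hub
        simp [this, pvNames])
    | ( -- group 0 unmatched, group 1 matched: best = 1
        rw [h0] at hA0; rw [h1] at hA1
        have hno0 : ∀ i < t.length, ¬ (["founder", "ceo", "cto", "entrepreneur", "co-founder"] : List String).any (fun kw => PySem.Chars.startswith (t.drop i) kw.toList) = true := by
          intro i hi hc
          exact absurd (hA0.mpr ⟨i, hi, hc⟩) (by simp)
        obtain ⟨i, hi, hc⟩ := hA1.mp rfl
        have hub : best ≤ 1 := by
          rw [hbest, foldl_min_le_iff]
          refine Or.inr ⟨i, List.mem_range.mpr hi, ?_⟩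
          rw [pvRankAt_eq, hc]
          simp [hno0 i hi]
        have hlb : 1 ≤ best := by
          rw [hbest]
          refine foldl_min_ge _ _ _ _ (by omega) ?_
          intro i hi
          rw [pvRankAt_eq]
          have := hno0 i (List.mem_range.mp hi)
          split_ifs <;> omega
        have : best = 1 := by omega
        simp [this, pvNames])
    | ( -- groups 0,1 unmatched, group 2 matched: best = 2
        rw [h0] at hA0; rw [h1] at hA1; rw [h2] at hA2
        have hno0 : ∀ i < t.length, ¬ (["founder", "ceo", "cto", "entrepreneur", "co-founder"] : List String).any (fun kw => PySem.Chars.startswith (t.drop i) kw.toList) = true := by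
          intro i hi hc; exact absurd (hA0.mpr ⟨i, hi, hc⟩) (by simp)
        have hno1 : ∀ i < t.length, ¬ (["engineer", "developer", "programmer", "architect"] : List String).any (fun kw => PySem.Chars.startswith (t.drop i) kw.toList) = true := by
          intro i hi hc; exact absurd (hA1.mpr ⟨i, hi, hc⟩) (by simp)
        obtain ⟨i, hi, hc⟩ := hA2.mp rfl
        have hub : best ≤ 2 := by
          rw [hbest, foldl_min_le_iff]
          refine Or.inr ⟨i, List.mem_range.mpr hi, ?_⟩
          rw [pvRankAt_eq, hc]
          simp [hno0 i hi, hno1 i hi]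
        have hlb : 2 ≤ best := by
          rw [hbest]
          refine foldl_min_ge _ _ _ _ (by omega) ?_
          intro i hi
          rw [pvRankAt_eq]
          have := hno0 i (List.mem_range.mp hi)
          have := hno1 i (List.mem_range.mp hi)
          split_ifs <;> omega
        have : best = 2 := by omega
        simp [this, pvNames])
    | ( -- nothing matched: best = 3
        rw [h0] at hA0; rw [h1] at hA1; rw [h2] at hA2
        have hno0 : ∀ i < t.length, ¬ (["founder", "ceo", "cto", "entrepreneur", "co-founder"] : List String).any (fun kw => PySem.Chars.startswith (t.drop i) kw.toList) = true := by
          intro i hi hc; exact absurd (hA0.mpr ⟨i, hi, hc⟩) (by simp)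
        have hno1 : ∀ i < t.length, ¬ (["engineer", "developer", "programmer", "architect"] : List String).any (fun kw => PySem.Chars.startswith (t.drop i) kw.toList) = true := by
          intro i hi hc; exact absurd (hA1.mpr ⟨i, hi, hc⟩) (by simp)
        have hno2 : ∀ i < t.length, ¬ (["designer", "artist", "writer", "creative", "musician"] : List String).any (fun kw => PySem.Chars.startswith (t.drop i) kw.toList) = true := by
          intro i hi hc; exact absurd (hA2.mpr ⟨i, hi, hc⟩) (by simp)
        have hlb : 3 ≤ best := by
          rw [hbest]
          refine foldl_min_ge _ _ _ _ (by omega) ?_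
          intro i hi
          rw [pvRankAt_eq]
          have := hno0 i (List.mem_range.mp hi)
          have := hno1 i (List.mem_range.mp hi)
          have := hno2 i (List.mem_range.mp hi)
          split_ifs <;> omega
        have : best = 3 := by omega
        simp [this, pvNames])
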